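-- pv_equiv track=rewrite | github.com/IJuanTM/advent-of-code | Python/aoc/2023/dec11/1.py | parse
-- ===== SOURCE A (Python) =====
-- def parse(image):
--     galaxies, rows, cols = [], [], list(range(len(image[0])))
--     for r, line in enumerate(image):
--         if all(el == "." for el in line):
--             rows.append(r)
--         else:
--             for c, el in enumerate(line):
--                 if el != ".":
--                     cols = [col for col in cols if col != c]
--                     galaxies.append((r, c))
--     return galaxies, rows, cols
-- ===== SOURCE B (Python) =====
-- def parse(image):
--     width = len(image[0])
--     galaxies = [(r, c) for r, line in enumerate(image) for c, el in enumerate(line) if el != "."]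
--     rows = [r for r, line in enumerate(image) if all(el == "." for el in line)]
--     occupied = {c for _, c in galaxies}
--     cols = [c for c in range(width) if c not in occupied]
--     return galaxies, rows, cols
-- ===== Notes on version B (the rewrite author's own statement) =====
-- stated objective: simpler
-- what changed: A interleaves one stateful row loop that filters the live cols list at every galaxy; B computes galaxies, empty rows and empty cols in three independent comprehensions, deriving cols from a set of occupied columns instead of repeated list filtering.
import Mathlib
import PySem

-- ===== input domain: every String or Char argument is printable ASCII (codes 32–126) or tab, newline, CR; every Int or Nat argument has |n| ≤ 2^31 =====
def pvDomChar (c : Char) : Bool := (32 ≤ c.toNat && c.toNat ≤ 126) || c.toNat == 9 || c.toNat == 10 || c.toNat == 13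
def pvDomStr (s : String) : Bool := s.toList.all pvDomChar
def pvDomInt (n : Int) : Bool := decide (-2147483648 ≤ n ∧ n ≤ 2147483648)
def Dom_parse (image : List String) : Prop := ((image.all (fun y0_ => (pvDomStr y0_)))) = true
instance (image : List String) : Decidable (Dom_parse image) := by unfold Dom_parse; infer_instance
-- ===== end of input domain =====

-- B computes the three results in independent passes (cols via a set of occupied columns)
-- instead of A's single stateful loop that refilters the live cols list at each galaxy; objective: simpler.

-- ===== PORT A =====
-- inner 'for c, el in enumerate(line)' loop, carrying (galaxies, cols)
def parseAInner (r : Int) (cs : List (Int × Char)) (st : List (Int × Int) × List Int) :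
    List (Int × Int) × List Int :=
  match cs with
  | [] => st
  | (c, el) :: rest =>
      if el ≠ '.' then
        parseAInner r rest (st.1 ++ [(r, c)], st.2.filter (fun col => col != c))
      else
        parseAInner r rest st

-- outer 'for r, line in enumerate(image)' loop, carrying (galaxies, rows, cols)
def parseALoop (lines : List (Int × String)) (st : List (Int × Int) × List Int × List Int) :
    List (Int × Int) × List Int × List Int :=
  match lines with
  | [] => st
  | (r, line) :: rest =>
      if line.toList.all (fun el => el == '.') then
        parseALoop rest (st.1, st.2.1 ++ [r], st.2.2)
      else
        let gc := parseAInner r (PySem.List.enumerate line.toList 0) (st.1, st.2.2)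
        parseALoop rest (gc.1, st.2.1, gc.2)

def parse (image : List String) : (List (Int × Int)) × List Int × List Int :=
  match image with
  | [] => ([], [], [])   -- Python raises IndexError on image[0]; excluded by Pre_parse
  | first :: _ =>
      parseALoop (PySem.List.enumerate image 0) ([], [], PySem.List.pyRange 0 (PySem.Str.len first) 1)

-- ===== PORT B =====
def parse_alt (image : List String) : (List (Int × Int)) × List Int × List Int :=
  match image with
  | [] => ([], [], [])   -- Python raises IndexError on image[0]; excluded by Pre_parse
  | first :: _ =>
      let width := PySem.Str.len first
      let galaxies := (PySem.List.enumerate image 0).flatMap (fun rl =>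
        (PySem.List.enumerate rl.2.toList 0).filterMap (fun ce =>
          if ce.2 ≠ '.' then some (rl.1, ce.1) else none))
      let rows := (PySem.List.enumerate image 0).filterMap (fun rl =>
        if rl.2.toList.all (fun el => el == '.') then some rl.1 else none)
      let occupied := PySem.Set.ofList (galaxies.map (fun g => g.2))
      let cols := (PySem.List.pyRange 0 width 1).filter (fun c => !(PySem.Set.contains occupied c))
      (galaxies, rows, cols)

-- ===== PRECONDITION & SPEC =====
-- Pre_ excludes only the empty image, on which Python A raises IndexError at image[0].
def Pre_parse (image : List String) : Prop := image ≠ []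
instance (image : List String) : Decidable (Pre_parse image) := by unfold Pre_parse; infer_instance
def pvWitness_parse : List String := ["#..", ".#.", "..."]

def Spec_parse (image : List String) (out : (List (Int × Int)) × List Int × List Int) : Prop := out = parse_alt image
instance (image : List String) (out : (List (Int × Int)) × List Int × List Int) : Decidable (Spec_parse image out) := by unfold Spec_parse; infer_instance

-- ===== CLAIM (what is proved, stated in full; the proofs are below) =====
def Claim_equal_parse : Prop := ∀ (image : List String), Dom_parse image → Pre_parse image → Spec_parse image (parse image)

-- ===== LEMMAS AND PROOFS =====

-- galaxies contributed by one line (as B's inner comprehension)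
def galRow (r : Int) (cs : List (Int × Char)) : List (Int × Int) :=
  cs.filterMap (fun ce => if ce.2 ≠ '.' then some (r, ce.1) else none)

-- occupied columns of one line
def occCols (cs : List (Int × Char)) : List Int :=
  cs.filterMap (fun ce => if ce.2 ≠ '.' then some ce.1 else none)

lemma map_snd_galRow (r : Int) (cs : List (Int × Char)) :
    (galRow r cs).map (fun g => g.2) = occCols cs := by
  rw [galRow, occCols, List.map_filterMap]
  congr 1
  funext ce
  by_cases h : ce.2 = '.' <;> simp [h]

lemma parseAInner_spec (r : Int) (cs : List (Int × Char)) (g : List (Int × Int)) (cols : List Int) :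
    parseAInner r cs (g, cols)
      = (g ++ galRow r cs, cols.filter (fun col => !(occCols cs).contains col)) := by
  induction cs generalizing g cols with
  | nil => simp [parseAInner, galRow, occCols]
  | cons h t ih =>
      obtain ⟨c, el⟩ := h
      by_cases hel : el ≠ '.'
      · simp only [parseAInner, if_pos hel, ih, galRow, occCols, List.filterMap_cons,
          List.filter_filter, Prod.mk.injEq]
        refine ⟨by simp, ?_⟩
        apply List.filter_congr
        intro x _
        by_cases hx : x = c <;> simp [hx]
      · simp only [parseAInner, if_neg hel, ih, galRow, occCols, List.filterMap_cons]

-- all-dot line contributes nothing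
lemma occCols_of_all_dot (cs : List Char) (s : Int) (h : cs.all (fun el => el == '.') = true) :
    occCols (PySem.List.enumerate cs s) = [] := by
  rw [occCols, List.filterMap_eq_nil_iff]
  intro a ha
  obtain ⟨k, hk, rfl⟩ := (PySem.List.mem_enumerate_iff _ _ _).1 ha
  have := (List.all_eq_true.1 h) cs[k] (by simp)
  simp_all

lemma galRow_of_all_dot (r : Int) (cs : List Char) (s : Int) (h : cs.all (fun el => el == '.') = true) :
    galRow r (PySem.List.enumerate cs s) = [] := by
  rw [galRow, List.filterMap_eq_nil_iff]
  intro a ha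
  obtain ⟨k, hk, rfl⟩ := (PySem.List.mem_enumerate_iff _ _ _).1 ha
  have := (List.all_eq_true.1 h) cs[k] (by simp)
  simp_all

-- B-shaped totals over a list of (row index, line)
def galAll (lines : List (Int × String)) : List (Int × Int) :=
  lines.flatMap (fun rl => galRow rl.1 (PySem.List.enumerate rl.2.toList 0))

def rowsAll (lines : List (Int × String)) : List Int :=
  lines.filterMap (fun rl => if rl.2.toList.all (fun el => el == '.') then some rl.1 else none)

def colsAll (lines : List (Int × String)) : List Int :=
  lines.flatMap (fun rl => occCols (PySem.List.enumerate rl.2.toList 0))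

lemma parseALoop_spec (lines : List (Int × String)) (g : List (Int × Int)) (rs cols : List Int) :
    parseALoop lines (g, rs, cols)
      = (g ++ galAll lines, rs ++ rowsAll lines, cols.filter (fun col => !(colsAll lines).contains col)) := by
  induction lines generalizing g rs cols with
  | nil => simp [parseALoop, galAll, rowsAll, colsAll]
  | cons h t ih =>
      obtain ⟨r, line⟩ := h
      by_cases hd : line.toList.all (fun el => el == '.') = true
      · simp only [parseALoop, if_pos hd, ih, galAll, rowsAll, colsAll, List.flatMap_cons,
          List.filterMap_cons, galRow_of_all_dot r _ _ hd, occCols_of_all_dot _ _ hd]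
        simp
      · simp only [parseALoop, if_neg hd, parseAInner_spec, ih, galAll, rowsAll, colsAll,
          List.flatMap_cons, List.filterMap_cons, List.filter_filter, Prod.mk.injEq]
        refine ⟨by simp, trivial, ?_⟩
        apply List.filter_congr
        intro x _
        by_cases hx : x ∈ occCols (PySem.List.enumerate line.toList 0) <;>
          by_cases hx2 : x ∈ colsAll t <;> simp_all

lemma map_snd_galAll (lines : List (Int × String)) :
    (galAll lines).map (fun g => g.2) = colsAll lines := by
  simp [galAll, colsAll, List.map_flatMap, map_snd_galRow]

lemma contains_ofList_int (l : List Int) (x : Int) :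
    PySem.Set.contains (PySem.Set.ofList l) x = l.contains x := by
  simp [pysem]

theorem parse_eq_alt (image : List String) (h : image ≠ []) : parse image = parse_alt image := by
  obtain ⟨first, rest, rfl⟩ := List.exists_cons_of_ne_nil h
  have halt : parse_alt (first :: rest)
      = (galAll (PySem.List.enumerate (first :: rest) 0),
         rowsAll (PySem.List.enumerate (first :: rest) 0),
         (PySem.List.pyRange 0 (PySem.Str.len first) 1).filter
           (fun c => !(PySem.Set.contains (PySem.Set.ofList
              ((galAll (PySem.List.enumerate (first :: rest) 0)).map (fun g => g.2))) c))) := rfl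
  show parseALoop _ _ = _
  rw [parseALoop_spec, halt, map_snd_galAll]
  refine congrArg _ (congrArg _ ?_)
  apply List.filter_congr
  intro x _
  rw [contains_ofList_int]

-- ===== VERDICT (by name: the statement is the Claim_ definition above) =====
theorem parse_spec : Claim_equal_parse := by
  intro image _ hpre
  unfold Spec_parse
  exact parse_eq_alt image hpre
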